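-- pv_equiv track=rewrite | github.com/tecle/fbsrv | src/celeryapp/kvcfgparser.py | _process_val
-- ===== SOURCE A (Python) =====
-- def _process_val(value):
--     stack = []
--     ret = []
--     for ch in value.strip():
--         if stack and stack[-1] == '\\':
--             ret.append(ch)
--             stack.pop(-1)
--         elif ch == '\\':
--             stack.append(ch)
--         elif ch == '"':
--             if stack and stack[-1] == '"':
--                 return ''.join(ret)
--             if not stack:
--                 if ret:
--                     raise ValueError('invalid value: %s' % value.strip())
--                 stack.append('"')
--         elif ch == '#':
--             if stack and stack[-1] == '"':
--                 ret.append(ch)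
--             else:
--                 return ''.join(ret).strip()
--         else:
--             ret.append(ch)
--     return ''.join(ret).strip()
-- ===== SOURCE B (Python) =====
-- def _process_val(value):
--     s = value.strip()
--     if s[:1] == '"':
--         buf = []
--         esc = False
--         for ch in s[1:]:
--             if esc:
--                 buf.append(ch)
--                 esc = False
--             elif ch == '\\':
--                 esc = True
--             elif ch == '"':
--                 return ''.join(buf)
--             else:
--                 buf.append(ch)
--         return ''.join(buf).strip()
--     buf = []
--     esc = False
--     for ch in s:
--         if esc:
--             buf.append(ch)
--             esc = False
--         elif ch == '\\':
--             esc = True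
--         elif ch == '"':
--             raise ValueError('invalid value: %s' % s)
--         elif ch == '#':
--             return ''.join(buf).strip()
--         else:
--             buf.append(ch)
--     return ''.join(buf).strip()
-- ===== Notes on version B (the rewrite author's own statement) =====
-- stated objective: simpler
-- what changed: Replaced A's single loop with a unified stack of '\' and '"' marks by an up-front dispatch on whether the stripped value starts with a double quote, followed by one of two specialized passes (quoted / bare) that each track only a boolean escape flag.
import Mathlib
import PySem

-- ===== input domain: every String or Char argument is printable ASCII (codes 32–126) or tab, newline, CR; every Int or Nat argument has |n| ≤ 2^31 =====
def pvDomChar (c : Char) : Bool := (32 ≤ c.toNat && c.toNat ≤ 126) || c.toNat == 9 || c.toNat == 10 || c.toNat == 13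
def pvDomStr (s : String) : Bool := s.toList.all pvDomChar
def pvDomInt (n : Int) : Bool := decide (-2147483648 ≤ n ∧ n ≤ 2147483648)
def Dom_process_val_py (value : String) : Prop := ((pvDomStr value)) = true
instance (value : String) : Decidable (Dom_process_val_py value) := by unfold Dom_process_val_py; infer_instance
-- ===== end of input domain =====

-- B replaces A's unified stack-of-marks state machine by an up-front dispatch on the first
-- character of the stripped value and two specialized escape-flag loops (quoted / bare): simpler.

-- ===== PORT A =====
-- A's single loop over the stripped value, with 'stack' (list of '\' / '"' marks) and 'ret';
-- 'none' marks the ValueError A raises on an unescaped '"' in bare mode with nonempty ret.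
def loopA : List Char → List Char → List Char → Option String
  | [], _, ret => some (PySem.Str.strip (String.ofList ret))
  | ch :: cs, stack, ret =>
    if stack.getLast? = some '\\' then loopA cs stack.dropLast (ret ++ [ch])
    else if ch = '\\' then loopA cs (stack ++ ['\\']) ret
    else if ch = '"' then
      if stack.getLast? = some '"' then some (String.ofList ret)
      else if stack = [] then
        if ret ≠ [] then none
        else loopA cs (stack ++ ['"']) ret
      else loopA cs stack ret
    else if ch = '#' then
      if stack.getLast? = some '"' then loopA cs stack (ret ++ [ch])
      else some (PySem.Str.strip (String.ofList ret))
    else loopA cs stack (ret ++ [ch])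

def process_val_py (value : String) : String :=
  (loopA (PySem.Str.strip value).toList [] []).getD ""

-- ===== PORT B =====
-- quoted mode: only an escape flag; unescaped '"' returns the buffer UNstripped; EOF strips.
def quotedLoop : List Char → Bool → List Char → String
  | [], _, buf => PySem.Str.strip (String.ofList buf)
  | ch :: cs, esc, buf =>
    if esc then quotedLoop cs false (buf ++ [ch])
    else if ch = '\\' then quotedLoop cs true buf
    else if ch = '"' then String.ofList buf
    else quotedLoop cs false (buf ++ [ch])

-- bare mode: escape flag only; 'none' is the ValueError on an unescaped '"'.
def bareLoop : List Char → Bool → List Char → Option String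
  | [], _, buf => some (PySem.Str.strip (String.ofList buf))
  | ch :: cs, esc, buf =>
    if esc then bareLoop cs false (buf ++ [ch])
    else if ch = '\\' then bareLoop cs true buf
    else if ch = '"' then none
    else if ch = '#' then some (PySem.Str.strip (String.ofList buf))
    else bareLoop cs false (buf ++ [ch])

def process_val_py_alt (value : String) : String :=
  let l := (PySem.Str.strip value).toList
  if l.head? = some '"' then quotedLoop l.tail false []
  else (bareLoop l false []).getD ""

-- ===== PRECONDITION & SPEC =====
-- first unescaped '"' or '#' of a bare (unquoted) value, skipping backslash-escaped characters
def scanBare : List Char → Bool → Option Char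
  | [], _ => none
  | ch :: cs, esc =>
    if esc then scanBare cs false
    else if ch = '\\' then scanBare cs true
    else if ch = '"' ∨ ch = '#' then some ch
    else scanBare cs false

-- Pre_ excludes exactly the inputs on which Python A raises ValueError (both A and B raise there):
-- a stripped value that does not start with '"' yet contains an unescaped '"' before any unescaped '#'.
def Pre_process_val_py (value : String) : Prop :=
  let l := (PySem.Str.strip value).toList
  l.head? = some '"' ∨ scanBare l false ≠ some '"'
instance (value : String) : Decidable (Pre_process_val_py value) := by unfold Pre_process_val_py; infer_instance

def pvWitness_process_val_py : String := " \"a \\\"b\" x"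

def Spec_process_val_py (value : String) (out : String) : Prop := out = process_val_py_alt value
instance (value : String) (out : String) : Decidable (Spec_process_val_py value out) := by unfold Spec_process_val_py; infer_instance

-- ===== CLAIM (what is proved, stated in full; the proofs are below) =====
def Claim_equal_process_val_py : Prop := ∀ (value : String), Dom_process_val_py value → Pre_process_val_py value → Spec_process_val_py value (process_val_py value)

-- ===== LEMMAS AND PROOFS =====

-- quoted mode: A's stack is ['"'] (esc=false) or ['"','\\'] (esc=true)
theorem loopA_quoted (cs : List Char) : ∀ (esc : Bool) (buf : List Char),
    loopA cs (if esc then ['"', '\\'] else ['"']) buf = some (quotedLoop cs esc buf) := by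
  induction cs with
  | nil => intro esc buf; cases esc <;> simp [loopA, quotedLoop]
  | cons ch cs ih =>
    intro esc buf
    cases esc with
    | true =>
      simpa [loopA, quotedLoop] using ih false (buf ++ [ch])
    | false =>
      by_cases h1 : ch = '\\'
      · simpa [loopA, quotedLoop, h1] using ih true buf
      · by_cases h2 : ch = '"'
        · simp [loopA, quotedLoop, h2]
        · simpa [loopA, quotedLoop, h1, h2] using ih false (buf ++ [ch])

-- bare mode: A's stack is [] (esc=false) or ['\\'] (esc=true); once the buffer is nonempty
-- (or an escape is pending) A and B agree, raising ('none') at the same unescaped '"'.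
theorem loopA_bare (cs : List Char) : ∀ (esc : Bool) (buf : List Char),
    (buf ≠ [] ∨ esc = true) →
    loopA cs (if esc then ['\\'] else []) buf = bareLoop cs esc buf := by
  induction cs with
  | nil => intro esc buf _; cases esc <;> simp [loopA, bareLoop]
  | cons ch cs ih =>
    intro esc buf h
    cases esc with
    | true =>
      simpa [loopA, bareLoop] using ih false (buf ++ [ch]) (Or.inl (by simp))
    | false =>
      have hbuf : buf ≠ [] := h.resolve_right (by simp)
      by_cases h1 : ch = '\\'
      · simpa [loopA, bareLoop, h1] using ih true buf (Or.inr rfl)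
      · by_cases h2 : ch = '"'
        · simp [loopA, bareLoop, h2, hbuf]
        · by_cases h3 : ch = '#'
          · simp [loopA, bareLoop, h3]
          · simpa [loopA, bareLoop, h1, h2, h3] using ih false (buf ++ [ch]) (Or.inl (by simp))

-- the two ports agree on every stripped character list (even where both 'raise': getD "")
theorem main_eq (l : List Char) :
    (loopA l [] []).getD "" =
      (if l.head? = some '"' then quotedLoop l.tail false []
       else (bareLoop l false []).getD "") := by
  cases l with
  | nil => simp [loopA, bareLoop]
  | cons ch cs =>
    by_cases h2 : ch = '"'
    · have h := loopA_quoted cs false []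
      simp at h
      simp [loopA, h2, h]
    · by_cases h1 : ch = '\\'
      · cases cs with
        | nil => simp [loopA, bareLoop, h1]
        | cons c cs' =>
          have h := loopA_bare cs' false [c] (Or.inl (by simp))
          simp at h
          simp [loopA, bareLoop, h1, h]
      · by_cases h3 : ch = '#'
        · simp [loopA, bareLoop, h3]
        · have h := loopA_bare cs false [ch] (Or.inl (by simp))
          simp at h
          simp [loopA, bareLoop, h1, h2, h3, h]

-- ===== VERDICT (by name: the statement is the Claim_ definition above) =====
theorem process_val_py_spec : Claim_equal_process_val_py := by
  intro value _ _
  unfold Spec_process_val_py process_val_py process_val_py_alt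
  exact main_eq _
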